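-- pv_equiv track=rewrite | github.com/BojanUSI/Python-Algorithms | Exam Exercises/oldmidterm2.py | algo_x
-- ===== SOURCE A (Python) =====
-- def algo_x(A):
--     for i in range(2, len(A)):
--         for j in range(1, i-1):
--             for k in range(0, j-1):
--                 if abs(A[i] - A[j]) == abs(A[j]- A[k])  or \
--                 abs(A[i] - A[k]) == abs(A[k]-A[j]) or \
--                 abs(A[k] - A[i]) == abs(A[i]-A[j]):
--                     return True
--
--     return False
-- ===== SOURCE B (Python) =====
-- def _gapped_pair(vals):
--     # True iff there are positions a < b in vals with b - a >= 2 and vals[a] == vals[b]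
--     seen = set()
--     for b in range(2, len(vals)):
--         seen.add(vals[b - 2])
--         if vals[b] in seen:
--             return True
--     return False
--
--
-- def algo_x(A):
--     n = len(A)
--     for p in range(n):
--         # p as the middle index: a common distance on both sides
--         left = {abs(A[p] - A[k]) for k in range(p - 1)}
--         if any(abs(A[i] - A[p]) in left for i in range(p + 2, n)):
--             return True
--         # p as the leftmost index: two equal distances among A[p+2:], positions >= 2 apart
--         if _gapped_pair([abs(A[p] - A[t]) for t in range(p + 2, n)]):
--             return True
--         # p as the rightmost index: two equal distances among A[:p-1], positions >= 2 apart
--         if _gapped_pair([abs(A[p] - A[t]) for t in range(p - 1)]):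
--             return True
--     return False
-- ===== Notes on version B (the rewrite author's own statement) =====
-- stated objective: faster
-- what changed: B replaces A's O(n^3) triple nested index loop by a per-pivot O(n) scan: for each pivot index it intersects hash sets of absolute distances to the left and right (middle-pivot case) and detects two equal distances at positions >= 2 apart on one side with a growing seen-set (end-pivot cases).
import Mathlib
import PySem

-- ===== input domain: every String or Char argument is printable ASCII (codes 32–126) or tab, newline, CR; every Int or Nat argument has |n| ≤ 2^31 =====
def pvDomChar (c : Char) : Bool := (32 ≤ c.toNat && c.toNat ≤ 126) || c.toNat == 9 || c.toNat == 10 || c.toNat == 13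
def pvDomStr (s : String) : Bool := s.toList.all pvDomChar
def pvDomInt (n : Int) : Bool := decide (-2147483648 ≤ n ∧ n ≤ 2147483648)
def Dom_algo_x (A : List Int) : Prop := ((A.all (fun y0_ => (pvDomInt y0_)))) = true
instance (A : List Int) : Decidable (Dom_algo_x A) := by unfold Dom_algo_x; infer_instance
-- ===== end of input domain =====

-- B replaces A's cubic triple loop by a quadratic per-pivot scan with hash sets of
-- absolute distances (objective: faster).

-- ===== PORT A =====
-- literal transliteration of A's triple nested loop with early return
def algo_x (A : List Int) : Bool :=
  (PySem.List.pyRange 2 (A.length : Int)).any (fun i =>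
    (PySem.List.pyRange 1 (i - 1)).any (fun j =>
      (PySem.List.pyRange 0 (j - 1)).any (fun k =>
        decide (|PySem.List.pyGetD A i 0 - PySem.List.pyGetD A j 0| = |PySem.List.pyGetD A j 0 - PySem.List.pyGetD A k 0|) ||
        decide (|PySem.List.pyGetD A i 0 - PySem.List.pyGetD A k 0| = |PySem.List.pyGetD A k 0 - PySem.List.pyGetD A j 0|) ||
        decide (|PySem.List.pyGetD A k 0 - PySem.List.pyGetD A i 0| = |PySem.List.pyGetD A i 0 - PySem.List.pyGetD A j 0|))))

-- ===== PORT B =====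
-- Source B's _gapped_pair: 'for b in range(2, len(vals))' with the growing set 'seen'
def gappedPairLoop (vals : List Int) : PySem.Set Int → List Int → Bool
  | _, [] => false
  | seen, b :: rest =>
    let seen' := PySem.Set.add seen (PySem.List.pyGetD vals (b - 2) 0)
    if PySem.Set.contains seen' (PySem.List.pyGetD vals b 0) then true
    else gappedPairLoop vals seen' rest

def gappedPair (vals : List Int) : Bool :=
  gappedPairLoop vals PySem.Set.empty (PySem.List.pyRange 2 (vals.length : Int))

def algo_x_alt (A : List Int) : Bool :=
  (PySem.List.pyRange 0 (A.length : Int)).any (fun p =>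
    (let left := PySem.Set.ofList ((PySem.List.pyRange 0 (p - 1)).map
        (fun k => |PySem.List.pyGetD A p 0 - PySem.List.pyGetD A k 0|))
     (PySem.List.pyRange (p + 2) (A.length : Int)).any (fun i =>
        PySem.Set.contains left |PySem.List.pyGetD A i 0 - PySem.List.pyGetD A p 0|)) ||
    gappedPair ((PySem.List.pyRange (p + 2) (A.length : Int)).map
        (fun t => |PySem.List.pyGetD A p 0 - PySem.List.pyGetD A t 0|)) ||
    gappedPair ((PySem.List.pyRange 0 (p - 1)).map
        (fun t => |PySem.List.pyGetD A p 0 - PySem.List.pyGetD A t 0|)))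

-- ===== PRECONDITION & SPEC =====
def Spec_algo_x (A : List Int) (out : Bool) : Prop := out = algo_x_alt A
instance (A : List Int) (out : Bool) : Decidable (Spec_algo_x A out) := by unfold Spec_algo_x; infer_instance

-- ===== CLAIM (what is proved, stated in full; the proofs are below) =====
def Claim_equal_algo_x : Prop := ∀ (A : List Int), Dom_algo_x A → Spec_algo_x A (algo_x A)

-- ===== LEMMAS AND PROOFS =====

-- the common existential both programs decide
def pvTriple (A : List Int) : Prop :=
  ∃ i j k : Nat, k + 2 ≤ j ∧ j + 2 ≤ i ∧ i < A.length ∧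
    (|A.getD i 0 - A.getD j 0| = |A.getD j 0 - A.getD k 0| ∨
     |A.getD i 0 - A.getD k 0| = |A.getD k 0 - A.getD j 0| ∨
     |A.getD k 0 - A.getD i 0| = |A.getD i 0 - A.getD j 0|)

lemma pyRange_nil_of_le {a b : Int} (h : b ≤ a) : PySem.List.pyRange a b = [] := by
  apply List.eq_nil_iff_forall_not_mem.mpr
  intro x hx
  rw [PySem.List.mem_pyRange_one] at hx
  omega

lemma pyRange_natCast (m : Nat) : ∀ s : Nat,
    PySem.List.pyRange (s : Int) (m : Int) = (List.range' s (m - s)).map (fun t : Nat => (t : Int)) := by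
  suffices h : ∀ d s : Nat, m - s = d →
      PySem.List.pyRange (s : Int) (m : Int) = (List.range' s (m - s)).map (fun t : Nat => (t : Int)) by
    intro s; exact h (m - s) s rfl
  intro d
  induction d with
  | zero =>
    intro s hs
    rw [pyRange_nil_of_le (by omega), hs]
    simp
  | succ d ihd =>
    intro s hs
    have hlt : s < m := by omega
    rw [PySem.List.pyRange_one_cons (by exact_mod_cast hlt),
        show ((s : Int) + 1) = ((s + 1 : Nat) : Int) by push_cast; ring,
        ihd (s + 1) (by omega),
        show m - s = (m - (s + 1)) + 1 by omega, List.range'_succ, List.map_cons]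

lemma gappedPairLoop_iff (vals : List Int) : ∀ (c : Nat), 2 ≤ c → ∀ (seen : PySem.Set Int),
    (∀ x, x ∈ seen ↔ ∃ a : Nat, a + 3 ≤ c ∧ vals.getD a 0 = x) →
    (gappedPairLoop vals seen (PySem.List.pyRange (c : Int) (vals.length : Int)) = true ↔
      ∃ a b : Nat, a + 2 ≤ b ∧ c ≤ b ∧ b < vals.length ∧ vals.getD a 0 = vals.getD b 0) := by
  suffices h : ∀ d c : Nat, vals.length - c = d → 2 ≤ c → ∀ seen : PySem.Set Int,
      (∀ x, x ∈ seen ↔ ∃ a : Nat, a + 3 ≤ c ∧ vals.getD a 0 = x) →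
      (gappedPairLoop vals seen (PySem.List.pyRange (c : Int) (vals.length : Int)) = true ↔
        ∃ a b : Nat, a + 2 ≤ b ∧ c ≤ b ∧ b < vals.length ∧ vals.getD a 0 = vals.getD b 0) by
    intro c hc seen hseen; exact h (vals.length - c) c rfl hc seen hseen
  intro d
  induction d with
  | zero =>
    intro c hd hc seen hseen
    rw [pyRange_nil_of_le (by omega)]
    simp only [gappedPairLoop]
    constructor
    · intro hf; exact absurd hf (by simp)
    · rintro ⟨a, b, _, _, _, _⟩; omega
  | succ d ihd =>
    intro c hd hc seen hseen
    have h : c < vals.length := by omega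
    rw [PySem.List.pyRange_one_cons (by exact_mod_cast h), gappedPairLoop]
    have hc2 : (c : Int) - 2 = ((c - 2 : Nat) : Int) := by omega
    rw [hc2, PySem.List.pyGetD_natCast, PySem.List.pyGetD_natCast]
    set seen' := PySem.Set.add seen (vals.getD (c - 2) 0) with hs'
    have hmem' : ∀ x, x ∈ seen' ↔ ∃ a : Nat, a + 3 ≤ c + 1 ∧ vals.getD a 0 = x := by
      intro x
      rw [hs', PySem.Set.mem_add, hseen x]
      constructor
      · rintro (⟨a, ha, hv⟩ | hx)
        · exact ⟨a, by omega, hv⟩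
        · exact ⟨c - 2, by omega, hx.symm⟩
      · rintro ⟨a, ha, hv⟩
        by_cases hac : a + 3 ≤ c
        · exact Or.inl ⟨a, hac, hv⟩
        · have : a = c - 2 := by omega
          subst this; exact Or.inr hv.symm
    by_cases ht : vals.getD c 0 ∈ seen'
    · rw [if_pos ((PySem.Set.contains_iff _ _).mpr ht)]
      simp only [true_iff]
      obtain ⟨a, ha, hv⟩ := (hmem' _).mp ht
      exact ⟨a, c, by omega, by omega, h, hv⟩
    · rw [if_neg (by simpa [PySem.Set.contains_iff] using ht)]
      rw [show ((c : Int) + 1) = ((c + 1 : Nat) : Int) by push_cast; ring,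
          ihd (c + 1) (by omega) (by omega) seen' hmem']
      constructor
      · rintro ⟨a, b, h1, h2, h3, h4⟩; exact ⟨a, b, h1, by omega, h3, h4⟩
      · rintro ⟨a, b, h1, h2, h3, h4⟩
        by_cases hbc : b = c
        · exfalso
          apply ht
          apply (hmem' _).mpr
          exact ⟨a, by omega, by rw [h4, hbc]⟩
        · exact ⟨a, b, h1, by omega, h3, h4⟩

lemma gappedPair_iff (vals : List Int) :
    gappedPair vals = true ↔
      ∃ a b : Nat, a + 2 ≤ b ∧ b < vals.length ∧ vals.getD a 0 = vals.getD b 0 := by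
  have hseen : ∀ x : Int, x ∈ (PySem.Set.empty : PySem.Set Int) ↔
      ∃ a : Nat, a + 3 ≤ 2 ∧ vals.getD a 0 = x := by
    intro x
    constructor
    · intro hx; exact absurd hx (by simp [PySem.Set.empty])
    · rintro ⟨a, ha, _⟩; omega
  rw [gappedPair, show (2 : Int) = ((2 : Nat) : Int) by norm_num,
      gappedPairLoop_iff vals 2 (le_refl 2) PySem.Set.empty hseen]
  constructor
  · rintro ⟨a, b, h1, _, h3, h4⟩; exact ⟨a, b, h1, h3, h4⟩
  · rintro ⟨a, b, h1, h3, h4⟩; exact ⟨a, b, h1, by omega, h3, h4⟩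

lemma getD_map_range' (f : Int → Int) (s len a : Nat) (ha : a < len) :
    ((List.range' s len).map (fun t : Nat => f (t : Int))).getD a 0 = f ((s + a : Nat) : Int) := by
  rw [List.getD_eq_getElem?_getD, List.getElem?_eq_getElem (by simpa using ha)]
  simp

lemma gappedPair_map_iff (f : Int → Int) (s n : Nat) :
    gappedPair ((PySem.List.pyRange (s : Int) (n : Int)).map f) = true ↔
      ∃ j i : Nat, s ≤ j ∧ j + 2 ≤ i ∧ i < n ∧ f (j : Int) = f (i : Int) := by
  rw [pyRange_natCast, List.map_map, gappedPair_iff]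
  simp only [Function.comp_def, List.length_map, List.length_range']
  constructor
  · rintro ⟨a, b, h1, h2, h3⟩
    rw [getD_map_range' f s (n - s) a (by omega), getD_map_range' f s (n - s) b h2] at h3
    exact ⟨s + a, s + b, by omega, by omega, by omega, h3⟩
  · rintro ⟨j, i, h1, h2, h3, h4⟩
    refine ⟨j - s, i - s, by omega, by omega, ?_⟩
    rw [getD_map_range' f s (n - s) (j - s) (by omega),
        getD_map_range' f s (n - s) (i - s) (by omega),
        show s + (j - s) = j by omega, show s + (i - s) = i by omega]
    exact h4

lemma gappedPair_map_iff0 (f : Int → Int) (n : Nat) :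
    gappedPair ((PySem.List.pyRange 0 (n : Int)).map f) = true ↔
      ∃ j i : Nat, j + 2 ≤ i ∧ i < n ∧ f (j : Int) = f (i : Int) := by
  have h := gappedPair_map_iff f 0 n
  rw [Nat.cast_zero] at h
  rw [h]
  constructor
  · rintro ⟨j, i, _, h2, h3, h4⟩; exact ⟨j, i, h2, h3, h4⟩
  · rintro ⟨j, i, h2, h3, h4⟩; exact ⟨j, i, Nat.zero_le j, h2, h3, h4⟩

lemma algo_x_iff (A : List Int) : algo_x A = true ↔ pvTriple A := by
  rw [algo_x]
  simp only [List.any_eq_true, PySem.List.mem_pyRange_one, Bool.or_eq_true, decide_eq_true_eq]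
  constructor
  · rintro ⟨i, ⟨hi2, hin⟩, j, ⟨hj1, hji⟩, k, ⟨hk0, hkj⟩, hcond⟩
    refine ⟨i.toNat, j.toNat, k.toNat, by omega, by omega, by omega, ?_⟩
    rw [PySem.List.pyGetD_of_nonneg A 0 (by omega), PySem.List.pyGetD_of_nonneg A 0 (by omega),
        PySem.List.pyGetD_of_nonneg A 0 (by omega)] at hcond
    exact or_assoc.mp hcond
  · rintro ⟨i, j, k, h1, h2, h3, hcond⟩
    refine ⟨(i : Int), ⟨by omega, by omega⟩, (j : Int), ⟨by omega, by omega⟩,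
      (k : Int), ⟨by omega, by omega⟩, ?_⟩
    rw [PySem.List.pyGetD_natCast, PySem.List.pyGetD_natCast, PySem.List.pyGetD_natCast]
    exact or_assoc.mpr hcond

lemma algo_x_alt_iff (A : List Int) : algo_x_alt A = true ↔ pvTriple A := by
  rw [algo_x_alt]
  simp only [List.any_eq_true, PySem.List.mem_pyRange_one, Bool.or_eq_true]
  constructor
  · rintro ⟨p, ⟨hp0, hpn⟩, hcase⟩
    obtain ⟨pn, rfl⟩ : ∃ pn : Nat, p = (pn : Int) := ⟨p.toNat, by omega⟩
    rcases hcase with (hcase | hcase) | hcase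
    · -- p is the middle index
      simp only [PySem.List.mem_pyRange_one, PySem.Set.contains_iff,
        PySem.Set.mem_ofList, List.mem_map] at hcase
      obtain ⟨i, ⟨hi1, hi2⟩, k, hk, hval⟩ := hcase
      refine ⟨i.toNat, pn, k.toNat, by omega, by omega, by omega, Or.inl ?_⟩
      rw [PySem.List.pyGetD_natCast] at hval
      rw [PySem.List.pyGetD_of_nonneg A 0 (by omega), PySem.List.pyGetD_of_nonneg A 0 (by omega)]
        at hval
      rw [← hval]
    · -- p is the leftmost index
      rw [show ((pn : Int) + 2) = ((pn + 2 : Nat) : Int) by push_cast; ring,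
          gappedPair_map_iff] at hcase
      obtain ⟨j, i, hj, hji, hin, hval⟩ := hcase
      rw [PySem.List.pyGetD_natCast, PySem.List.pyGetD_natCast, PySem.List.pyGetD_natCast] at hval
      refine ⟨i, j, pn, by omega, by omega, by omega, Or.inr (Or.inl ?_)⟩
      rw [abs_sub_comm (A.getD i 0), ← hval, abs_sub_comm]
    · -- p is the rightmost index
      rcases Nat.eq_zero_or_pos pn with h0 | h0
      · subst h0
        rw [show ((0 : Nat) : Int) - 1 = -1 by norm_num, pyRange_nil_of_le (by norm_num)] at hcase
        simp only [List.map_nil, List.length_nil, Nat.cast_zero, gappedPair] at hcase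
        rw [pyRange_nil_of_le (by norm_num)] at hcase
        exact absurd hcase (by simp [gappedPairLoop])
      · rw [show ((pn : Int) - 1) = ((pn - 1 : Nat) : Int) by omega, gappedPair_map_iff0] at hcase
        obtain ⟨k, j, hkj, hjp, hval⟩ := hcase
        rw [PySem.List.pyGetD_natCast, PySem.List.pyGetD_natCast, PySem.List.pyGetD_natCast] at hval
        refine ⟨pn, j, k, by omega, by omega, by omega, Or.inr (Or.inr ?_)⟩
        calc |A.getD k 0 - A.getD pn 0| = |A.getD pn 0 - A.getD k 0| := abs_sub_comm _ _
          _ = |A.getD pn 0 - A.getD j 0| := hval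
  · rintro ⟨i, j, k, h1, h2, h3, hcond⟩
    rcases hcond with hval | hval | hval
    · -- middle pivot p := j, first disjunct of B
      refine ⟨(j : Int), ⟨by omega, by omega⟩, Or.inl (Or.inl ?_)⟩
      simp only [PySem.List.mem_pyRange_one, PySem.Set.contains_iff,
        PySem.Set.mem_ofList, List.mem_map]
      refine ⟨(i : Int), ⟨by omega, by omega⟩, (k : Int), ⟨by omega, by omega⟩, ?_⟩
      rw [PySem.List.pyGetD_natCast, PySem.List.pyGetD_natCast, PySem.List.pyGetD_natCast, hval]
    · -- leftmost pivot p := k, second disjunct of B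
      refine ⟨(k : Int), ⟨by omega, by omega⟩, Or.inl (Or.inr ?_)⟩
      rw [show ((k : Int) + 2) = ((k + 2 : Nat) : Int) by push_cast; ring, gappedPair_map_iff]
      refine ⟨j, i, by omega, by omega, by omega, ?_⟩
      rw [PySem.List.pyGetD_natCast, PySem.List.pyGetD_natCast, PySem.List.pyGetD_natCast]
      calc |A.getD k 0 - A.getD j 0| = |A.getD i 0 - A.getD k 0| := hval.symm
        _ = |A.getD k 0 - A.getD i 0| := abs_sub_comm _ _
    · -- rightmost pivot p := i, third disjunct of B
      refine ⟨(i : Int), ⟨by omega, by omega⟩, Or.inr ?_⟩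
      rw [show ((i : Int) - 1) = ((i - 1 : Nat) : Int) by omega, gappedPair_map_iff0]
      refine ⟨k, j, by omega, by omega, ?_⟩
      rw [PySem.List.pyGetD_natCast, PySem.List.pyGetD_natCast, PySem.List.pyGetD_natCast]
      rw [abs_sub_comm (A.getD i 0) (A.getD k 0)]
      exact hval

-- ===== VERDICT (by name: the statement is the Claim_ definition above) =====
theorem algo_x_spec : Claim_equal_algo_x := by
  intro A _
  unfold Spec_algo_x
  rw [Bool.eq_iff_iff, algo_x_iff, algo_x_alt_iff]
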